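-- pv_equiv track=rewrite | github.com/tomasmb/arborschool-content | scripts/notation_fix_rules.py | _join_thousands_groups
-- ===== SOURCE A (Python) =====
-- def _join_thousands_groups(digits: str) -> str:
--     """Join a digit string into 3-digit groups separated by &#160;."""
--     parts: list[str] = []
--     while len(digits) > 3:
--         parts.append(digits[-3:])
--         digits = digits[:-3]
--     parts.append(digits)
--     parts.reverse()
--     return "&#160;".join(parts)
-- ===== SOURCE B (Python) =====
-- def _join_thousands_groups(digits: str) -> str:
--     """Join a digit string into 3-digit groups separated by &#160;."""
--     n = len(digits)
--     r = n % 3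
--     parts = [digits[:r]] if r else []
--     for i in range(r, n, 3):
--         parts.append(digits[i:i + 3])
--     return "&#160;".join(parts)
-- ===== Notes on version B (the rewrite author's own statement) =====
-- stated objective: faster
-- what changed: Replaces the right-to-left peel-and-reverse loop (repeatedly re-slicing the shrinking string with digits[-3:]/digits[:-3], then parts.reverse()) with a single left-to-right pass that computes the leading group length as len(digits) % 3 and steps through the string in 3-digit slices.
import Mathlib
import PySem

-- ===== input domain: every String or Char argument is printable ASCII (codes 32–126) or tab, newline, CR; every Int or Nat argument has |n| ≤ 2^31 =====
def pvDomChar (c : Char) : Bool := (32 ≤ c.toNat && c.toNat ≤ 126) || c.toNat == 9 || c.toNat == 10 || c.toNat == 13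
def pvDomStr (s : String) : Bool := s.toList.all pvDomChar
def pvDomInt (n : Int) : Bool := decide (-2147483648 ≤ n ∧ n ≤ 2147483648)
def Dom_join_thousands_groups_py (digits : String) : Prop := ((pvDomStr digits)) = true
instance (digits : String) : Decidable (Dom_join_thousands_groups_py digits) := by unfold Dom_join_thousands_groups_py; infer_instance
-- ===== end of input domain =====

-- B replaces A's right-to-left peel-and-reverse loop by a single left-to-right pass whose
-- leading group length is len % 3 (alternative decomposition; same return value).

-- ===== PORT A =====
-- while len(digits) > 3: parts.append(digits[-3:]); digits = digits[:-3]
-- then parts.append(digits)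
def pvALoop (digits : List Char) (parts : List (List Char)) : List (List Char) :=
  if _h : 3 < digits.length then
    pvALoop (PySem.List.slice digits none (some (-3)))
            (parts ++ [PySem.List.slice digits (some (-3)) none])
  else parts ++ [digits]
termination_by digits.length
decreasing_by
  rw [PySem.List.slice_to_neg_ofNat digits 3 (by omega)]
  simp; omega

-- parts.reverse(); return "&#160;".join(parts)
def join_thousands_groups_py (digits : String) : String :=
  String.ofList (PySem.Chars.join "&#160;".toList ((pvALoop digits.toList []).reverse))

-- ===== PORT B =====
-- n = len(digits); r = n % 3; parts = [digits[:r]] if r else []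
-- for i in range(r, n, 3): parts.append(digits[i:i+3]); return "&#160;".join(parts)
def join_thousands_groups_py_alt (digits : String) : String :=
  let cs := digits.toList
  let n : Int := cs.length
  let r : Int := PySem.Int.mod n 3
  let parts0 : List (List Char) :=
    if r ≠ 0 then [PySem.List.slice cs none (some r)] else []
  let parts := (PySem.List.pyRange r n 3).foldl
    (fun ps i => ps ++ [PySem.List.slice cs (some i) (some (i + 3))]) parts0
  String.ofList (PySem.Chars.join "&#160;".toList parts)

-- ===== PRECONDITION & SPEC =====
def Spec_join_thousands_groups_py (digits : String) (out : String) : Prop := out = join_thousands_groups_py_alt digits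
instance (digits : String) (out : String) : Decidable (Spec_join_thousands_groups_py digits out) := by unfold Spec_join_thousands_groups_py; infer_instance

-- ===== CLAIM (what is proved, stated in full; the proofs are below) =====
def Claim_equal_join_thousands_groups_py : Prop := ∀ (digits : String), Dom_join_thousands_groups_py digits → Spec_join_thousands_groups_py digits (join_thousands_groups_py digits)

-- ===== LEMMAS AND PROOFS =====

-- the chunk decomposition both programs produce (proof-only helper)
def pvGroups (cs : List Char) : List (List Char) :=
  (if cs.length % 3 = 0 then [] else [cs.take (cs.length % 3)]) ++
  (List.range ((cs.length - cs.length % 3) / 3)).map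
    (fun k => (cs.drop (cs.length % 3 + 3 * k)).take 3)

theorem pvALoop_acc (cs : List Char) (parts : List (List Char)) :
    pvALoop cs parts = parts ++ pvALoop cs [] := by
  induction h : cs.length using Nat.strong_induction_on generalizing cs parts with
  | _ n ih =>
    subst h
    rw [pvALoop]
    conv_rhs => rw [pvALoop]
    by_cases h3 : 3 < cs.length
    · simp only [h3, dif_pos]
      have hlen : (PySem.List.slice cs none (some (-3))).length < cs.length := by
        rw [PySem.List.slice_to_neg_ofNat cs 3 (by omega)]; simp; omega
      rw [ih _ hlen _ _ rfl, ih _ hlen _ ([] ++ _) rfl]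
      simp
    · simp [h3]

theorem pvALoop_eq_pvGroups (cs : List Char) (hne : cs ≠ []) :
    (pvALoop cs []).reverse = pvGroups cs := by
  induction h : cs.length using Nat.strong_induction_on generalizing cs with
  | _ n ih =>
    subst h
    by_cases h3 : 3 < cs.length
    · -- peel the last 3 characters
      have hfront : PySem.List.slice cs none (some (-3)) = cs.take (cs.length - 3) :=
        PySem.List.slice_to_neg_ofNat cs 3 (by omega)
      have hpeel : PySem.List.slice cs (some (-3)) none = cs.drop (cs.length - 3) :=
        PySem.List.slice_from_neg_ofNat cs 3 (by omega)
      rw [pvALoop]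
      simp only [h3, dif_pos, hfront, hpeel]
      rw [pvALoop_acc]
      have hlen : (cs.take (cs.length - 3)).length = cs.length - 3 := by simp
      have hne' : cs.take (cs.length - 3) ≠ [] := by
        intro hnil
        have := congrArg List.length hnil
        rw [hlen] at this; simp at this; omega
      have hrec := ih (cs.length - 3) (by omega) (cs.take (cs.length - 3)) hne' hlen
      simp only [List.nil_append, List.reverse_append, List.reverse_cons, List.reverse_nil,
        List.nil_append, hrec]
      unfold pvGroups
      rw [hlen, show (cs.length - 3) % 3 = cs.length % 3 from by omega]
      rw [show (cs.length - cs.length % 3) / 3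
            = ((cs.length - 3 - cs.length % 3) / 3) + 1 from by omega]
      rw [List.range_succ, List.map_append, List.map_cons, List.map_nil]
      have hP : (if cs.length % 3 = 0 then ([] : List (List Char))
            else [(cs.take (cs.length - 3)).take (cs.length % 3)])
          = (if cs.length % 3 = 0 then [] else [cs.take (cs.length % 3)]) := by
        split
        · rfl
        · rw [List.take_take]
          congr 2
          omega
      have hmap : (List.range ((cs.length - 3 - cs.length % 3) / 3)).map
            (fun k => ((cs.take (cs.length - 3)).drop (cs.length % 3 + 3 * k)).take 3)
          = (List.range ((cs.length - 3 - cs.length % 3) / 3)).map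
            (fun k => (cs.drop (cs.length % 3 + 3 * k)).take 3) := by
        apply List.map_congr_left
        intro k hk
        simp only [List.mem_range] at hk
        rw [List.drop_take, List.take_take]
        congr 1
        omega
      have hlast : cs.drop (cs.length - 3)
          = (cs.drop (cs.length % 3 + 3 * ((cs.length - 3 - cs.length % 3) / 3))).take 3 := by
        rw [show cs.length % 3 + 3 * ((cs.length - 3 - cs.length % 3) / 3)
              = cs.length - 3 from by omega]
        exact (List.take_of_length_le (by simp; omega)).symm
      rw [hP, hmap, hlast]
      simp [List.append_assoc]
    · -- short string: a single group
      rw [pvALoop, dif_neg h3]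
      simp only [List.nil_append, List.reverse_cons, List.reverse_nil]
      unfold pvGroups
      have hlen : 0 < cs.length := List.length_pos_of_ne_nil hne
      by_cases hmod : cs.length % 3 = 0
      · have h3' : cs.length = 3 := by omega
        rw [if_pos hmod, show (cs.length - cs.length % 3) / 3 = 1 from by omega]
        simp only [List.range_succ, List.range_zero, List.nil_append, List.map_cons,
          List.map_nil]
        rw [show cs.length % 3 + 3 * 0 = 0 from by omega, List.drop_zero, ← h3',
          List.take_length]
      · rw [if_neg hmod, show (cs.length - cs.length % 3) / 3 = 0 from by omega]
        rw [show cs.length % 3 = cs.length from by omega]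
        simp

theorem pvRange_chunks (cs : List Char) :
    (PySem.List.pyRange ((cs.length % 3 : Nat) : Int) ((cs.length : Nat) : Int) 3).map
      (fun i => PySem.List.slice cs (some i) (some (i + 3)))
    = (List.range ((cs.length - cs.length % 3) / 3)).map
      (fun k => (cs.drop (cs.length % 3 + 3 * k)).take 3) := by
  rw [PySem.List.pyRange_of_pos _ _ (by norm_num : (0:Int) < 3)]
  rw [show (if ((cs.length % 3 : Nat) : Int) < ((cs.length : Nat) : Int) then
        ((((cs.length : Nat) : Int)) - ((cs.length % 3 : Nat) : Int) + 3 - 1) / 3 |>.toNat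
      else 0) = (cs.length - cs.length % 3) / 3 from by split <;> omega]
  rw [List.map_map]
  apply List.map_congr_left
  intro k hk
  simp only [Function.comp_apply]
  rw [show ((cs.length % 3 : Nat) : Int) + 3 * (k : Int)
        = ((cs.length % 3 + 3 * k : Nat) : Int) from by push_cast; ring]
  rw [show ((cs.length % 3 + 3 * k : Nat) : Int) + 3
        = ((cs.length % 3 + 3 * k : Nat) : Int) + ((3 : Nat) : Int) from by norm_num]
  rw [PySem.List.slice_natCast_add]

theorem alt_eq_pvGroups (digits : String) :
    join_thousands_groups_py_alt digits
      = String.ofList (PySem.Chars.join "&#160;".toList (pvGroups digits.toList)) := by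
  simp only [join_thousands_groups_py_alt]
  congr 1
  rw [PySem.List.foldl_append_singleton_eq_map]
  have hmod : PySem.Int.mod ((digits.toList.length : Nat) : Int) 3
      = ((digits.toList.length % 3 : Nat) : Int) := by
    simp [PySem.Int.mod, Int.fmod_eq_emod]
  rw [hmod, pvRange_chunks]
  unfold pvGroups
  congr 1
  by_cases h0 : digits.toList.length % 3 = 0
  · have hc0 : ((digits.toList.length % 3 : Nat) : Int) = 0 := by exact_mod_cast h0
    rw [if_neg (not_not_intro hc0), if_pos h0]
  · have hc : ((digits.toList.length % 3 : Nat) : Int) ≠ 0 := Nat.cast_ne_zero.mpr h0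
    rw [if_pos hc, if_neg h0, PySem.List.slice_to_natCast]

-- ===== VERDICT (by name: the statement is the Claim_ definition above) =====
theorem join_thousands_groups_py_spec : Claim_equal_join_thousands_groups_py := by
  intro digits _
  unfold Spec_join_thousands_groups_py
  rw [alt_eq_pvGroups]
  unfold join_thousands_groups_py
  by_cases hne : digits.toList = []
  · rw [hne, pvALoop]
    simp [pvGroups, PySem.Chars.join_singleton, PySem.Chars.join_nil]
  · rw [pvALoop_eq_pvGroups _ hne]
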